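-- pv_equiv track=rewrite | github.com/Cheril311/LP2 | AI/water_jug.py | solve
-- ===== SOURCE A (Python) =====
-- from collections import deque
--
-- def solve(jug1,jug2,target):
--
--     initial = (0,0)
--     actions = [
--         ('Fill Jug1',lambda state: (jug1,state[1])),
--         ('Fill Jug2',lambda state: (state[0],jug2)),
--         ('Empty Jug1', lambda state: (0,state[1])),
--         ('Empty Jug2', lambda state: (state[0],0)),
--         ('Pour Jug1 to Jug2', lambda state: (max(0,state[0]+state[1]-jug2),min(state[0]+state[1],jug2))),
--         ('Pour Jug2 to Jug1', lambda state: (min(state[0]+state[1],jug1),max(0,state[0]+state[1]-jug1)))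
--     ]
--
--     queue = deque()
--     queue.append((initial,[]))
--     visited = set()
--
--     while queue:
--         curr,path = queue.popleft()
--
--         if curr[0]==target or curr[1]==target:
--             return path
--
--         for action,func in actions:
--             new = func(curr)
--             if new not in visited:
--                 queue.append((new,path+[(action,new)]))
--                 visited.add(new)
--     return None
-- ===== SOURCE B (Python) =====
-- def solve(jug1, jug2, target):
--     # Level-synchronous BFS with a parent map: no queue of (state, path) pairs,
--     # no per-enqueue path copying; the action path is reconstructed once at the end.
--     def successors(s):
--         a, b = s
--         t = a + b
--         return [('Fill Jug1', (jug1, b)),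
--                 ('Fill Jug2', (a, jug2)),
--                 ('Empty Jug1', (0, b)),
--                 ('Empty Jug2', (a, 0)),
--                 ('Pour Jug1 to Jug2', (max(0, t - jug2), min(t, jug2))),
--                 ('Pour Jug2 to Jug1', (min(t, jug1), max(0, t - jug1)))]
--     parent = {}            # state -> (previous state, action that produced it)
--     visited = set()
--     frontier = [(0, 0)]
--     while frontier:
--         for s in frontier:
--             if s[0] == target or s[1] == target:
--                 steps = []
--                 while s != (0, 0):
--                     prev, act = parent[s]
--                     steps.append((act, s))
--                     s = prev
--                 steps.reverse()
--                 return steps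
--         nxt = []
--         for s in frontier:
--             for action, new in successors(s):
--                 if new not in visited:
--                     visited.add(new)
--                     parent[new] = (s, action)
--                     nxt.append(new)
--         frontier = nxt
--     return None
-- ===== Notes on version B (the rewrite author's own statement) =====
-- stated objective: faster
-- what changed: B replaces A's queue of (state, path) pairs — which copies the whole path at every enqueue — by a level-synchronous BFS over bare states with a parent map (state -> (previous state, action)), reconstructing the action path once when the goal is found.
-- outside the precondition, e.g. on solve(-2, -3, -2): A returns [('Fill Jug1', (-2, 0))], B returns [('Fill Jug1', (-2, 0))]
import Mathlib
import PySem

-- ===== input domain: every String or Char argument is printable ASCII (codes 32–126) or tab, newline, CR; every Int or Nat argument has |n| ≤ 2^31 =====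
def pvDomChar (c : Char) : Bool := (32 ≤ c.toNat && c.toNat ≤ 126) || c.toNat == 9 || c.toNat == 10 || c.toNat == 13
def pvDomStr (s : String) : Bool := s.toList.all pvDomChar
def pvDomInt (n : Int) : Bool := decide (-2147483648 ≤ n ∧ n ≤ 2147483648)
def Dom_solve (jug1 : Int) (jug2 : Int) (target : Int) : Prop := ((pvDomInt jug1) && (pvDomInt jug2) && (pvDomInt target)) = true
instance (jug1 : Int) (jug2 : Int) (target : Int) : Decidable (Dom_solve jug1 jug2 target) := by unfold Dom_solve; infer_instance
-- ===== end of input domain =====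

-- B replaces A's queue of (state, path) pairs — which copies the whole path at every
-- enqueue — by a level-synchronous BFS over plain states with a parent map, and
-- reconstructs the action path once at the end; return value only.

-- ===== PORT A =====
-- the `actions` list of A: (name, successor function) pairs
def pvActs (jug1 : Int) (jug2 : Int) : List (String × ((Int × Int) → (Int × Int))) :=
  [("Fill Jug1", fun s => (jug1, s.2)),
   ("Fill Jug2", fun s => (s.1, jug2)),
   ("Empty Jug1", fun s => ((0 : Int), s.2)),
   ("Empty Jug2", fun s => (s.1, (0 : Int))),
   ("Pour Jug1 to Jug2", fun s => (max 0 (s.1 + s.2 - jug2), min (s.1 + s.2) jug2)),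
   ("Pour Jug2 to Jug1", fun s => (min (s.1 + s.2) jug1, max 0 (s.1 + s.2 - jug1)))]

-- fuel bound for the unbounded Python while-loops (both programs).  Under
-- Pre_solve (nonnegative capacities) the reachable state space has at most
-- (jug1+1)*(jug2+1) states, so this fuel is never exhausted (proved below).
def pvFuel (jug1 : Int) (jug2 : Int) (target : Int) : Nat :=
  ((jug1.natAbs + 1) * (jug2.natAbs + 1) + 4) * (target.natAbs + jug1.natAbs + jug2.natAbs + 4) * 8

-- body of A's `for action,func in actions:` loop (mutating (queue, visited))
def pvStepA (curr : Int × Int) (path : List (String × (Int × Int)))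
    (st : List ((Int × Int) × List (String × (Int × Int))) × PySem.Set (Int × Int))
    (af : String × ((Int × Int) → (Int × Int))) :
    List ((Int × Int) × List (String × (Int × Int))) × PySem.Set (Int × Int) :=
  let new := af.2 curr
  if st.2.contains new then st
  else (st.1 ++ [(new, path ++ [(af.1, new)])], st.2.add new)

-- A's `while queue:` loop
def pvLoopA (jug1 : Int) (jug2 : Int) (target : Int) :
    Nat → List ((Int × Int) × List (String × (Int × Int))) → PySem.Set (Int × Int) →
    Option (List (String × (Int × Int)))
  | 0, _, _ => none
  | _ + 1, [], _ => none
  | n + 1, (curr, path) :: rest, visited =>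
    if curr.1 = target ∨ curr.2 = target then some path
    else
      let st := (pvActs jug1 jug2).foldl (pvStepA curr path) (rest, visited)
      pvLoopA jug1 jug2 target n st.1 st.2

def solve (jug1 : Int) (jug2 : Int) (target : Int) : Option (List (String × (Int × Int))) :=
  pvLoopA jug1 jug2 target (pvFuel jug1 jug2 target) [(((0 : Int), (0 : Int)), [])] PySem.Set.empty

-- ===== PORT B =====
-- B's `successors(s)`: the six (action, new state) pairs, computed directly
def pvSuccs (jug1 : Int) (jug2 : Int) (s : Int × Int) : List (String × (Int × Int)) :=
  let t := s.1 + s.2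
  [("Fill Jug1", (jug1, s.2)),
   ("Fill Jug2", (s.1, jug2)),
   ("Empty Jug1", ((0 : Int), s.2)),
   ("Empty Jug2", (s.1, (0 : Int))),
   ("Pour Jug1 to Jug2", (max 0 (t - jug2), min t jug2)),
   ("Pour Jug2 to Jug1", (min t jug1, max 0 (t - jug1)))]

-- B's reconstruction loop `while s != (0,0): prev, act = parent[s]; steps.append((act, s)); s = prev`.
-- Python's while is unbounded and parent[s] is always present for states the search
-- produced; the port runs it on fuel (never exhausted in the proved region) and stops
-- on a missing key (unreachable there).
def pvWalk (parent : PySem.Dict (Int × Int) ((Int × Int) × String)) :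
    Nat → (Int × Int) → List (String × (Int × Int)) → List (String × (Int × Int))
  | 0, _, acc => acc
  | n + 1, s, acc =>
    if s = ((0 : Int), (0 : Int)) then acc
    else
      match parent.get? s with
      | some pa => pvWalk parent n pa.1 (acc ++ [(pa.2, s)])
      | none => acc

-- body of B's `for action, new in successors(s):` loop (mutating (nxt, visited, parent))
def pvStepB (s : Int × Int)
    (st : List (Int × Int) × PySem.Set (Int × Int) × PySem.Dict (Int × Int) ((Int × Int) × String))
    (an : String × (Int × Int)) :
    List (Int × Int) × PySem.Set (Int × Int) × PySem.Dict (Int × Int) ((Int × Int) × String) :=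
  if st.2.1.contains an.2 then st
  else (st.1 ++ [an.2], st.2.1.add an.2, st.2.2.insert an.2 (s, an.1))

-- B's `while frontier:` loop: scan the level for a goal state, else expand the whole level
def pvLoopB (jug1 : Int) (jug2 : Int) (target : Int) :
    Nat → List (Int × Int) → PySem.Set (Int × Int) →
    PySem.Dict (Int × Int) ((Int × Int) × String) → Option (List (String × (Int × Int)))
  | 0, _, _, _ => none
  | _ + 1, [], _, _ => none
  | n + 1, s0 :: fs, visited, parent =>
    match (s0 :: fs).find? (fun s => decide (s.1 = target ∨ s.2 = target)) with
    | some s => some ((pvWalk parent (pvFuel jug1 jug2 target) s []).reverse)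
    | none =>
      let st := (s0 :: fs).foldl
        (fun st s => (pvSuccs jug1 jug2 s).foldl (pvStepB s) st) ([], visited, parent)
      pvLoopB jug1 jug2 target n st.1 st.2.1 st.2.2

def solve_alt (jug1 : Int) (jug2 : Int) (target : Int) : Option (List (String × (Int × Int))) :=
  pvLoopB jug1 jug2 target (pvFuel jug1 jug2 target) [((0 : Int), (0 : Int))]
    PySem.Set.empty PySem.Dict.empty

-- ===== PRECONDITION & SPEC =====
-- Pre_solve restricts to the natural domain of the puzzle: nonnegative jug capacities.
-- With a negative capacity the pour actions can grow states without bound and A's BFS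
-- may loop forever (e.g. jug1 = -4, jug2 = -6, target = 5); on the excluded inputs where
-- the search does happen to close, A returns normally (and B matches it there too).
def Pre_solve (jug1 : Int) (jug2 : Int) (target : Int) : Prop := 0 ≤ jug1 ∧ 0 ≤ jug2
instance (jug1 : Int) (jug2 : Int) (target : Int) : Decidable (Pre_solve jug1 jug2 target) := by
  unfold Pre_solve; infer_instance

def pvWitness_solve : Int × Int × Int := (4, 3, 2)

def Spec_solve (jug1 : Int) (jug2 : Int) (target : Int) (out : Option (List (String × (Int × Int)))) : Prop := out = solve_alt jug1 jug2 target
instance (jug1 : Int) (jug2 : Int) (target : Int) (out : Option (List (String × (Int × Int)))) : Decidable (Spec_solve jug1 jug2 target out) := by unfold Spec_solve; infer_instance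

-- ===== CLAIM (what is proved, stated in full; the proofs are below) =====
def Claim_equal_solve : Prop := ∀ (jug1 : Int) (jug2 : Int) (target : Int), Dom_solve jug1 jug2 target → Pre_solve jug1 jug2 target → Spec_solve jug1 jug2 target (solve jug1 jug2 target)

-- ===== LEMMAS AND PROOFS =====

-- A's action fold re-expressed over the list of (action, successor-state) pairs
def pvStepA' (curr : Int × Int) (path : List (String × (Int × Int)))
    (st : List ((Int × Int) × List (String × (Int × Int))) × PySem.Set (Int × Int))
    (an : String × (Int × Int)) :
    List ((Int × Int) × List (String × (Int × Int))) × PySem.Set (Int × Int) :=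
  if st.2.contains an.2 then st
  else (st.1 ++ [(an.2, path ++ [(an.1, an.2)])], st.2.add an.2)

-- the state "previous in the chain" encoded by a reversed path
def pvPrev : List (String × (Int × Int)) → (Int × Int)
  | [] => ((0 : Int), (0 : Int))
  | (_, u) :: _ => u

-- a reversed path rp leading to s is correctly recorded in the parent map
def pvRevOk (v : PySem.Set (Int × Int))
    (parent : PySem.Dict (Int × Int) ((Int × Int) × String)) :
    List (String × (Int × Int)) → (Int × Int) → Prop
  | [], s => s = ((0 : Int), (0 : Int))
  | (a, t) :: rest, s =>
      s = t ∧ t ≠ ((0 : Int), (0 : Int)) ∧ t ∈ v ∧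
      parent.get? t = some (pvPrev rest, a) ∧ pvRevOk v parent rest (pvPrev rest)

-- per-queue-entry invariant: its stored path is reconstructible from the parent map,
-- except for a re-enqueued copy of (0,0) (which can never be the goal when target ≠ 0)
def pvEntryInv (v : PySem.Set (Int × Int))
    (parent : PySem.Dict (Int × Int) ((Int × Int) × String))
    (e : (Int × Int) × List (String × (Int × Int))) : Prop :=
  pvRevOk v parent e.2.reverse e.1 ∨ (e.1 = ((0 : Int), (0 : Int)) ∧ ((0 : Int), (0 : Int)) ∈ v)

def pvGrid (jug1 : Int) (jug2 : Int) (s : Int × Int) : Prop :=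
  0 ≤ s.1 ∧ s.1 ≤ jug1 ∧ 0 ≤ s.2 ∧ s.2 ≤ jug2

def pvG (jug1 : Int) (jug2 : Int) : Nat := (jug1.natAbs + 1) * (jug2.natAbs + 1)

lemma pvFoldA_eq (jug1 jug2 : Int) (curr : Int × Int) (path : List (String × (Int × Int)))
    (st : List ((Int × Int) × List (String × (Int × Int))) × PySem.Set (Int × Int)) :
    (pvActs jug1 jug2).foldl (pvStepA curr path) st
      = (pvSuccs jug1 jug2 curr).foldl (pvStepA' curr path) st := rfl

lemma pvFoldA_shift (s : Int × Int) (p : List (String × (Int × Int)))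
    (ls : List (String × (Int × Int))) :
    ∀ (F R : List ((Int × Int) × List (String × (Int × Int)))) (v : PySem.Set (Int × Int)),
      ls.foldl (pvStepA' s p) (F ++ R, v)
        = (F ++ (ls.foldl (pvStepA' s p) (R, v)).1, (ls.foldl (pvStepA' s p) (R, v)).2) := by
  induction ls with
  | nil => intro F R v; rfl
  | cons an tl ih =>
    intro F R v
    simp only [List.foldl_cons, pvStepA']
    by_cases h : v.contains an.2
    · simp only [h, if_pos]
      exact ih F R v
    · simp only [h, Bool.false_eq_true, if_neg, not_false_iff]
      rw [show (F ++ R) ++ [(an.2, p ++ [(an.1, an.2)])] = F ++ (R ++ [(an.2, p ++ [(an.1, an.2)])]) from (List.append_assoc _ _ _)]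
      exact ih F _ _

lemma pvWalk_of_revOk (parent : PySem.Dict (Int × Int) ((Int × Int) × String))
    (v : PySem.Set (Int × Int)) :
    ∀ (rp : List (String × (Int × Int))) (s : Int × Int), pvRevOk v parent rp s →
      ∀ (n : Nat), rp.length ≤ n → ∀ acc, pvWalk parent n s acc = acc ++ rp := by
  intro rp
  induction rp with
  | nil =>
    intro s h n hn acc
    subst h
    cases n with
    | zero => simp [pvWalk]
    | succ m => simp [pvWalk]
  | cons at' rest ih =>
    intro s h n hn acc
    obtain ⟨a, t⟩ := at'
    obtain ⟨hst, htz, _, hget, hrest⟩ := h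
    cases n with
    | zero => simp at hn
    | succ m =>
      rw [hst]
      simp only [pvWalk, htz, if_neg, not_false_iff, hget]
      have := ih (pvPrev rest) hrest m (by simpa using hn) (acc ++ [(a, t)])
      rw [this]
      simp

lemma pvPrev_of_revOk (v : PySem.Set (Int × Int))
    (parent : PySem.Dict (Int × Int) ((Int × Int) × String))
    (rp : List (String × (Int × Int))) (s : Int × Int) (h : pvRevOk v parent rp s) :
    pvPrev rp = s := by
  cases rp with
  | nil => exact h.symm
  | cons x rest => exact (h.1).symm

lemma pvRevOk_mono (v v' : PySem.Set (Int × Int))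
    (parent : PySem.Dict (Int × Int) ((Int × Int) × String))
    (k : Int × Int) (x : (Int × Int) × String) (hk : k ∉ v)
    (hsub : ∀ y ∈ v, y ∈ v') :
    ∀ (rp : List (String × (Int × Int))) (s : Int × Int),
      pvRevOk v parent rp s → pvRevOk v' (parent.insert k x) rp s := by
  intro rp
  induction rp with
  | nil => intro s h; exact h
  | cons at' rest ih =>
    intro s h
    obtain ⟨a, t⟩ := at'
    obtain ⟨hst, htz, htv, hget, hrest⟩ := h
    refine ⟨hst, htz, hsub t htv, ?_, ih _ hrest⟩
    rw [PySem.Dict.get?_insert_of_ne parent x (by rintro rfl; exact hk htv)]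
    exact hget

lemma pvEntryInv_step (v : PySem.Set (Int × Int))
    (parent : PySem.Dict (Int × Int) ((Int × Int) × String))
    (k : Int × Int) (x : (Int × Int) × String) (hk : k ∉ v)
    (e : (Int × Int) × List (String × (Int × Int)))
    (h : pvEntryInv v parent e) : pvEntryInv (v.add k) (parent.insert k x) e := by
  rcases h with h | ⟨h0, hv⟩
  · exact Or.inl (pvRevOk_mono v (v.add k) parent k x hk
      (fun y hy => by simp [PySem.Set.mem_add, hy]) _ _ h)
  · exact Or.inr ⟨h0, by simp [PySem.Set.mem_add, hv]⟩

lemma pvGrid_succs (jug1 jug2 : Int) (h1 : 0 ≤ jug1) (h2 : 0 ≤ jug2)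
    (s : Int × Int) (hs : pvGrid jug1 jug2 s) :
    ∀ x ∈ pvSuccs jug1 jug2 s, pvGrid jug1 jug2 x.2 := by
  intro x hx
  obtain ⟨ha0, ha1, hb0, hb1⟩ := hs
  simp only [pvSuccs, List.mem_cons, List.not_mem_nil, or_false] at hx
  rcases hx with rfl | rfl | rfl | rfl | rfl | rfl <;>
    · unfold pvGrid; dsimp only; omega

lemma pvVsize (jug1 jug2 : Int) (h1 : 0 ≤ jug1) (h2 : 0 ≤ jug2)
    (v : PySem.Set (Int × Int)) (hn : v.Nodup) (hg : ∀ x ∈ v, pvGrid jug1 jug2 x) :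
    v.length ≤ pvG jug1 jug2 := by
  classical
  have hcard : v.length = v.toFinset.card := (List.toFinset_card_of_nodup hn).symm
  have hsub : v.toFinset ⊆ Finset.Icc (0 : Int) jug1 ×ˢ Finset.Icc (0 : Int) jug2 := by
    intro x hx
    have hxv : x ∈ v := List.mem_toFinset.mp hx
    obtain ⟨ha0, ha1, hb0, hb1⟩ := hg x hxv
    simp [Finset.mem_product, Finset.mem_Icc]
    omega
  have hle := Finset.card_le_card hsub
  rw [Finset.card_product] at hle
  simp only [Int.card_Icc] at hle
  have h1' : (jug1 + 1 - 0).toNat = jug1.natAbs + 1 := by omega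
  have h2' : (jug2 + 1 - 0).toNat = jug2.natAbs + 1 := by omega
  rw [h1', h2'] at hle
  rw [hcard]
  exact hle

lemma pvFuel_big (jug1 jug2 target : Int) :
    pvG jug1 jug2 + 1 ≤ pvFuel jug1 jug2 target := by
  unfold pvG pvFuel
  generalize (jug1.natAbs + 1) * (jug2.natAbs + 1) = c
  have h4 : 4 ≤ target.natAbs + jug1.natAbs + jug2.natAbs + 4 := by omega
  calc c + 1 ≤ (c + 4) * 1 * 8 := by omega
    _ ≤ (c + 4) * (target.natAbs + jug1.natAbs + jug2.natAbs + 4) * 8 := by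
        apply Nat.mul_le_mul_right
        apply Nat.mul_le_mul_left
        omega

-- the big per-entry fold correspondence: A's fold appends (state, path) entries,
-- B's fold appends the same states and records the same steps in the parent map
lemma pvExpandFold (jug1 jug2 : Int) (s : Int × Int) (p : List (String × (Int × Int))) :
    ∀ (ls : List (String × (Int × Int)))
      (Q : List ((Int × Int) × List (String × (Int × Int)))) (N : List (Int × Int))
      (v : PySem.Set (Int × Int)) (parent : PySem.Dict (Int × Int) ((Int × Int) × String)),
      (pvRevOk v parent p.reverse s ∨ (s = ((0 : Int), (0 : Int)) ∧ ∀ x ∈ ls, x.2 ∈ v)) →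
      v.Nodup → p.length ≤ v.length →
      ∃ Δ : List ((Int × Int) × List (String × (Int × Int))),
        (ls.foldl (pvStepA' s p) (Q, v)).1 = Q ++ Δ ∧
        (ls.foldl (pvStepA' s p) (Q, v)).2 = (ls.foldl (pvStepB s) (N, v, parent)).2.1 ∧
        (ls.foldl (pvStepB s) (N, v, parent)).1 = N ++ Δ.map Prod.fst ∧
        (∀ e ∈ Δ, pvEntryInv (ls.foldl (pvStepB s) (N, v, parent)).2.1
            (ls.foldl (pvStepB s) (N, v, parent)).2.2 e ∧
          e.2.length ≤ (ls.foldl (pvStepB s) (N, v, parent)).2.1.length ∧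
          e.1 ∈ ls.map Prod.snd) ∧
        (∀ y ∈ v, y ∈ (ls.foldl (pvStepB s) (N, v, parent)).2.1) ∧
        (ls.foldl (pvStepB s) (N, v, parent)).2.1.Nodup ∧
        v.length + Δ.length = (ls.foldl (pvStepB s) (N, v, parent)).2.1.length ∧
        (∀ x ∈ (ls.foldl (pvStepB s) (N, v, parent)).2.1, x ∈ v ∨ x ∈ ls.map Prod.snd) ∧
        (∀ x ∈ ls, x.2 ∈ (ls.foldl (pvStepB s) (N, v, parent)).2.1) ∧
        (∀ e, pvEntryInv v parent e →
          pvEntryInv (ls.foldl (pvStepB s) (N, v, parent)).2.1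
            (ls.foldl (pvStepB s) (N, v, parent)).2.2 e) := by
  intro ls
  induction ls with
  | nil =>
    intro Q N v parent hsrc hnd hplen
    exact ⟨[], by simp, rfl, by simp, by simp, fun y hy => hy, hnd, by simp,
      fun x hx => Or.inl hx, by simp, fun e he => he⟩
  | cons an tl ih =>
    intro Q N v parent hsrc hnd hplen
    obtain ⟨a, new⟩ := an
    by_cases hmem : new ∈ v
    · -- `new in visited`: both folds skip this successor
      have hc : v.contains new = true := (PySem.Set.contains_iff v new).mpr hmem
      have hA : pvStepA' s p (Q, v) (a, new) = (Q, v) := by simp [pvStepA', hmem]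
      have hB : pvStepB s (N, v, parent) (a, new) = (N, v, parent) := by simp [pvStepB, hmem]
      simp only [List.foldl_cons, hA, hB]
      have hsrc' : pvRevOk v parent p.reverse s ∨ (s = ((0 : Int), (0 : Int)) ∧ ∀ x ∈ tl, x.2 ∈ v) := by
        rcases hsrc with h | ⟨h0, hall⟩
        · exact Or.inl h
        · exact Or.inr ⟨h0, fun x hx => hall x (List.mem_cons_of_mem _ hx)⟩
      obtain ⟨Δ, c1, c2, c3, c4, c5, c6, c7, c8, c9, c10⟩ := ih Q N v parent hsrc' hnd hplen
      refine ⟨Δ, c1, c2, c3, ?_, c5, c6, c7, ?_, ?_, c10⟩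
      · intro e he
        obtain ⟨d1, d2, d3⟩ := c4 e he
        exact ⟨d1, d2, by simpa using Or.inr (by simpa using d3)⟩
      · intro x hx
        rcases c8 x hx with h | h
        · exact Or.inl h
        · exact Or.inr (by simpa using Or.inr (by simpa using h))
      · intro x hx
        rcases List.mem_cons.mp hx with rfl | hx'
        · exact c5 new hmem
        · exact c9 x hx'
    · -- fresh state: A enqueues (new, path+[(a,new)]), B records visited + parent
      have hc : v.contains new = false := by
        rcases h : v.contains new with _ | _
        · rfl
        · exact absurd ((PySem.Set.contains_iff v new).mp h) hmem
      have hrev : pvRevOk v parent p.reverse s := by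
        rcases hsrc with h | ⟨h0, hall⟩
        · exact h
        · exact absurd (hall (a, new) (List.mem_cons_self)) hmem
      have hA : pvStepA' s p (Q, v) (a, new)
          = (Q ++ [(new, p ++ [(a, new)])], v.add new) := by simp [pvStepA', hmem]
      have hB : pvStepB s (N, v, parent) (a, new)
          = (N ++ [new], v.add new, parent.insert new (s, a)) := by simp [pvStepB, hmem]
      simp only [List.foldl_cons, hA, hB]
      have hsub : ∀ y ∈ v, y ∈ v.add new := fun y hy => by simp [PySem.Set.mem_add, hy]
      have hvlen : (v.add new).length = v.length + 1 := by
        rw [PySem.Set.add_of_not_mem hmem]; simp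
      have hsrc' : pvRevOk (v.add new) (parent.insert new (s, a)) p.reverse s :=
        pvRevOk_mono v (v.add new) parent new (s, a) hmem hsub p.reverse s hrev
      have hnd' : (v.add new).Nodup := PySem.Set.nodup_add v new hnd
      obtain ⟨Δ, c1, c2, c3, c4, c5, c6, c7, c8, c9, c10⟩ :=
        ih (Q ++ [(new, p ++ [(a, new)])]) (N ++ [new]) (v.add new) (parent.insert new (s, a))
          (Or.inl hsrc') hnd' (by omega)
      refine ⟨(new, p ++ [(a, new)]) :: Δ, ?_, c2, ?_, ?_, ?_, c6, ?_, ?_, ?_, ?_⟩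
      · rw [c1]; simp
      · rw [c3]; simp
      · intro e he
        rcases List.mem_cons.mp he with rfl | he'
        · -- the freshly created entry
          have hE : pvEntryInv (v.add new) (parent.insert new (s, a)) (new, p ++ [(a, new)]) := by
            by_cases hz : new = ((0 : Int), (0 : Int))
            · exact Or.inr ⟨hz, by simp [PySem.Set.mem_add, hz]⟩
            · refine Or.inl ?_
              have hrevlist : (p ++ [(a, new)]).reverse = (a, new) :: p.reverse := by simp
              rw [hrevlist]
              refine ⟨rfl, hz, by simp [PySem.Set.mem_add], ?_, ?_⟩
              · rw [pvPrev_of_revOk v parent p.reverse s hrev]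
                simp [PySem.Dict.get?_insert_self]
              · rw [pvPrev_of_revOk v parent p.reverse s hrev]
                exact hsrc'
          refine ⟨c10 _ hE, ?_, by simp⟩
          simp only [List.length_append, List.length_cons, List.length_nil]
          omega
        · obtain ⟨d1, d2, d3⟩ := c4 e he'
          exact ⟨d1, d2, by simpa using Or.inr (by simpa using d3)⟩
      · intro y hy
        exact c5 y (hsub y hy)
      · have : v.length + (Δ.length + 1) = (v.add new).length + Δ.length := by omega
        rw [List.length_cons]
        omega
      · intro x hx
        rcases c8 x hx with h | h
        · rcases (PySem.Set.mem_add v new x).mp h with h' | rfl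
          · exact Or.inl h'
          · exact Or.inr (by simp)
        · exact Or.inr (by simpa using Or.inr (by simpa using h))
      · intro x hx
        rcases List.mem_cons.mp hx with rfl | hx'
        · exact c5 new (by simp [PySem.Set.mem_add])
        · exact c9 x hx'
      · intro e he
        exact c10 e (pvEntryInv_step v parent new (s, a) hmem e he)

-- level-wide correspondence: expanding a whole frontier
lemma pvExpandLevel (jug1 jug2 : Int) (h1 : 0 ≤ jug1) (h2 : 0 ≤ jug2) :
    ∀ (front Q : List ((Int × Int) × List (String × (Int × Int))))
      (v : PySem.Set (Int × Int)) (parent : PySem.Dict (Int × Int) ((Int × Int) × String)),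
      (∀ e ∈ front ++ Q, pvEntryInv v parent e) →
      (∀ e ∈ front ++ Q, e.2.length ≤ v.length) →
      (∀ e ∈ front ++ Q, pvGrid jug1 jug2 e.1) →
      (∀ x ∈ v, pvGrid jug1 jug2 x) →
      v.Nodup →
      ((((0 : Int), (0 : Int)) ∈ v ∧ ∀ x ∈ pvSuccs jug1 jug2 ((0 : Int), (0 : Int)), x.2 ∈ v)
        ∨ (front = [(((0 : Int), (0 : Int)), [])] ∧ Q = [] ∧ v = [])) →
      (let rA := front.foldl
          (fun st e => (pvSuccs jug1 jug2 e.1).foldl (pvStepA' e.1 e.2) st) (Q, v)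
       let rB := front.foldl
          (fun st e => (pvSuccs jug1 jug2 e.1).foldl (pvStepB e.1) st) (Q.map Prod.fst, v, parent)
       rA.2 = rB.2.1 ∧ rB.1 = rA.1.map Prod.fst ∧
       (∀ e ∈ rA.1, pvEntryInv rB.2.1 rB.2.2 e) ∧
       (∀ e ∈ rA.1, e.2.length ≤ rB.2.1.length) ∧
       (∀ e ∈ rA.1, pvGrid jug1 jug2 e.1) ∧
       (∀ x ∈ rB.2.1, pvGrid jug1 jug2 x) ∧
       rB.2.1.Nodup ∧
       (∀ y ∈ v, y ∈ rB.2.1) ∧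
       (front ≠ [] → (((0 : Int), (0 : Int)) ∈ rB.2.1 ∧
          ∀ x ∈ pvSuccs jug1 jug2 ((0 : Int), (0 : Int)), x.2 ∈ rB.2.1)) ∧
       rA.1.length + v.length = Q.length + rB.2.1.length ∧
       v.length ≤ rB.2.1.length) := by
  intro front
  induction front with
  | nil =>
    intro Q v parent hI1 hI2 hI3 hI4 hI5 hI6
    dsimp only
    refine ⟨rfl, rfl, ?_, ?_, ?_, hI4, hI5, fun y hy => hy, fun h => absurd rfl h, rfl, le_refl _⟩
    · intro e he; exact hI1 e (by simpa using he)
    · intro e he; exact hI2 e (by simpa using he)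
    · intro e he; exact hI3 e (by simpa using he)
  | cons e ft ih =>
    intro Q v parent hI1 hI2 hI3 hI4 hI5 hI6
    dsimp only
    simp only [List.foldl_cons]
    have heQ : e ∈ (e :: ft) ++ Q := by simp
    have hsrc : pvRevOk v parent e.2.reverse e.1 ∨
        (e.1 = ((0 : Int), (0 : Int)) ∧ ∀ x ∈ pvSuccs jug1 jug2 e.1, x.2 ∈ v) := by
      rcases hI1 e heQ with h | ⟨h0, hv0⟩
      · exact Or.inl h
      · rcases hI6 with ⟨_, hs00⟩ | ⟨_, _, hv⟩
        · exact Or.inr ⟨h0, by rw [h0]; exact hs00⟩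
        · exact absurd hv0 (by simp [hv])
    obtain ⟨Δ, c1, c2, c3, c4, c5, c6, c7, c8, c9, c10⟩ :=
      pvExpandFold jug1 jug2 e.1 e.2 (pvSuccs jug1 jug2 e.1) Q (Q.map Prod.fst) v parent
        hsrc hI5 (hI2 e heQ)
    set x := (pvSuccs jug1 jug2 e.1).foldl (pvStepB e.1) (Q.map Prod.fst, v, parent) with hx
    set y := (pvSuccs jug1 jug2 e.1).foldl (pvStepA' e.1 e.2) (Q, v) with hy
    have hAstep : y = (Q ++ Δ, x.2.1) := by
      rw [show (Q ++ Δ, x.2.1) = (y.1, y.2) from by rw [c1, c2]]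
    have hBstep : x = ((Q ++ Δ).map Prod.fst, x.2.1, x.2.2) := by
      rw [show (Q ++ Δ).map Prod.fst = x.1 from by rw [c3, List.map_append]]
    rw [hAstep, hBstep]
    have hvv' : v.length ≤ x.2.1.length := by omega
    have hgridnew : ∀ s', s' ∈ (pvSuccs jug1 jug2 e.1).map Prod.snd → pvGrid jug1 jug2 s' := by
      intro s' hs'
      obtain ⟨z, hz, rfl⟩ := List.mem_map.mp hs'
      exact pvGrid_succs jug1 jug2 h1 h2 e.1 (hI3 e heQ) z hz
    have hI6' : (((0 : Int), (0 : Int)) ∈ x.2.1 ∧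
        ∀ w ∈ pvSuccs jug1 jug2 ((0 : Int), (0 : Int)), w.2 ∈ x.2.1) := by
      rcases hI6 with ⟨hz, hs00⟩ | ⟨hfront, hQ, hv⟩
      · exact ⟨c5 _ hz, fun w hw => c5 _ (hs00 w hw)⟩
      · obtain ⟨he0, hft⟩ := List.cons_eq_cons.mp hfront
        subst he0
        refine ⟨?_, fun w hw => c9 w hw⟩
        have : (("Empty Jug1", ((0 : Int), (0 : Int))) : String × (Int × Int))
            ∈ pvSuccs jug1 jug2 ((0 : Int), (0 : Int)) := by simp [pvSuccs]
        simpa using c9 _ this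
    have hmain := ih (Q ++ Δ) x.2.1 x.2.2
      (by
        intro e' he'
        rcases List.mem_append.mp he' with h | h
        · exact c10 e' (hI1 e' (by simp [h]))
        · rcases List.mem_append.mp h with h' | h'
          · exact c10 e' (hI1 e' (by simp [h']))
          · exact (c4 e' h').1)
      (by
        intro e' he'
        rcases List.mem_append.mp he' with h | h
        · exact le_trans (hI2 e' (by simp [h])) hvv'
        · rcases List.mem_append.mp h with h' | h'
          · exact le_trans (hI2 e' (by simp [h'])) hvv'
          · exact (c4 e' h').2.1)
      (by
        intro e' he'
        rcases List.mem_append.mp he' with h | h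
        · exact hI3 e' (by simp [h])
        · rcases List.mem_append.mp h with h' | h'
          · exact hI3 e' (by simp [h'])
          · exact hgridnew e'.1 (c4 e' h').2.2)
      (by
        intro w hw
        rcases c8 w hw with h | h
        · exact hI4 w h
        · exact hgridnew w h)
      c6
      (Or.inl hI6')
    dsimp only at hmain
    obtain ⟨d1, d2, d3, d4, d5, d6, d7, d8, _, d10, d11⟩ := hmain
    refine ⟨d1, d2, d3, d4, d5, d6, d7, ?_, ?_, ?_, ?_⟩
    · intro z hz; exact d8 z (c5 z hz)
    · intro _
      exact ⟨d8 _ hI6'.1, fun w hw => d8 _ (hI6'.2 w hw)⟩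
    · simp only [List.length_append] at d10 ⊢
      omega
    · omega
-- A's loop, processed one whole level at a time
lemma pvLevelA (jug1 jug2 target : Int) :
    ∀ (front rest : List ((Int × Int) × List (String × (Int × Int))))
      (fA : Nat) (v : PySem.Set (Int × Int)),
      pvLoopA jug1 jug2 target (fA + front.length) (front ++ rest) v =
        match front.find? (fun e => decide (e.1.1 = target ∨ e.1.2 = target)) with
        | some e => some e.2
        | none =>
          pvLoopA jug1 jug2 target fA
            (front.foldl (fun st e => (pvSuccs jug1 jug2 e.1).foldl (pvStepA' e.1 e.2) st) (rest, v)).1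
            (front.foldl (fun st e => (pvSuccs jug1 jug2 e.1).foldl (pvStepA' e.1 e.2) st) (rest, v)).2 := by
  intro front
  induction front with
  | nil => intro rest fA v; simp [List.find?]
  | cons e ft ih =>
    intro rest fA v
    obtain ⟨curr, path⟩ := e
    have hlen : fA + (((curr, path) :: ft).length) = (fA + ft.length) + 1 := by
      simp; omega
    rw [hlen]
    show pvLoopA jug1 jug2 target ((fA + ft.length) + 1) ((curr, path) :: (ft ++ rest)) v = _
    by_cases hg : curr.1 = target ∨ curr.2 = target
    · simp only [pvLoopA, hg, if_pos, List.find?_cons, decide_true]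
    · have hfind : List.find? (fun e => decide (e.1.1 = target ∨ e.1.2 = target)) (((curr, path)) :: ft)
          = List.find? (fun e => decide (e.1.1 = target ∨ e.1.2 = target)) ft := by
        rw [List.find?_cons_of_neg]
        simp [hg]
      simp only [pvLoopA, hg, if_neg, not_false_iff, hfind]
      rw [pvFoldA_eq]
      rw [pvFoldA_shift curr path (pvSuccs jug1 jug2 (curr, path).1) ft rest v]
      have := ih ((pvSuccs jug1 jug2 (curr, path).1).foldl (pvStepA' (curr, path).1 (curr, path).2) (rest, v)).1 fA
        ((pvSuccs jug1 jug2 (curr, path).1).foldl (pvStepA' (curr, path).1 (curr, path).2) (rest, v)).2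
      simp only [List.foldl_cons]
      exact this

-- the bisimulation: A's FIFO loop equals B's level-synchronous loop
lemma pvBisim (jug1 jug2 target : Int) (h1 : 0 ≤ jug1) (h2 : 0 ≤ jug2) (htz : target ≠ 0) :
    ∀ (fB fA : Nat) (qA : List ((Int × Int) × List (String × (Int × Int))))
      (v : PySem.Set (Int × Int)) (parent : PySem.Dict (Int × Int) ((Int × Int) × String)),
      (∀ e ∈ qA, pvEntryInv v parent e) →
      (∀ e ∈ qA, e.2.length ≤ v.length) →
      (∀ e ∈ qA, pvGrid jug1 jug2 e.1) →
      (∀ x ∈ v, pvGrid jug1 jug2 x) →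
      v.Nodup →
      ((((0 : Int), (0 : Int)) ∈ v ∧ ∀ x ∈ pvSuccs jug1 jug2 ((0 : Int), (0 : Int)), x.2 ∈ v)
        ∨ (qA = [(((0 : Int), (0 : Int)), [])] ∧ v = [])) →
      qA.length + (pvG jug1 jug2 - v.length) ≤ fA →
      qA.length + (pvG jug1 jug2 - v.length) ≤ fB →
      pvLoopA jug1 jug2 target fA qA v
        = pvLoopB jug1 jug2 target fB (qA.map Prod.fst) v parent := by
  intro fB
  induction fB with
  | zero =>
    intro fA qA v parent hI1 hI2 hI3 hI4 hI5 hI6 hfA hfB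
    have hq : qA = [] := List.length_eq_zero_iff.mp (by omega)
    subst hq
    cases fA with
    | zero => rfl
    | succ m => rfl
  | succ n ih =>
    intro fA qA v parent hI1 hI2 hI3 hI4 hI5 hI6 hfA hfB
    cases qA with
    | nil =>
      cases fA with
      | zero => rfl
      | succ m => rfl
    | cons e ft =>
      have hvG : v.length ≤ pvG jug1 jug2 := pvVsize jug1 jug2 h1 h2 v hI5 hI4
      obtain ⟨fA', rfl⟩ : ∃ fA', fA = fA' + (e :: ft).length :=
        ⟨fA - (e :: ft).length, by simp at hfA ⊢; omega⟩
      have hlev := pvLevelA jug1 jug2 target (e :: ft) [] fA' v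
      rw [List.append_nil] at hlev
      rw [hlev]
      cases hfind : (e :: ft).find? (fun e => decide (e.1.1 = target ∨ e.1.2 = target)) with
      | some g =>
        have hfindB : (e.1 :: List.map Prod.fst ft).find?
            (fun s => decide (s.1 = target ∨ s.2 = target)) = some g.1 := by
          rw [← List.map_cons, List.find?_map]
          have : ((fun s : Int × Int => decide (s.1 = target ∨ s.2 = target)) ∘ Prod.fst)
              = (fun e : (Int × Int) × List (String × (Int × Int)) =>
                  decide (e.1.1 = target ∨ e.1.2 = target)) := rfl
          rw [this, hfind, Option.map_some]
        have hg : g ∈ e :: ft := List.mem_of_find?_eq_some hfind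
        have hgoal : g.1.1 = target ∨ g.1.2 = target := by
          have := List.find?_some hfind
          simpa using this
        have hrev : pvRevOk v parent g.2.reverse g.1 := by
          rcases hI1 g hg with h | ⟨h0, _⟩
          · exact h
          · exfalso
            rw [h0] at hgoal
            simp at hgoal
            exact htz hgoal.symm
        have hlen : g.2.reverse.length ≤ pvFuel jug1 jug2 target := by
          have hb := pvFuel_big jug1 jug2 target
          have := hI2 g hg
          simp only [List.length_reverse]
          omega
        have hwalk := pvWalk_of_revOk parent v g.2.reverse g.1 hrev
          (pvFuel jug1 jug2 target) hlen []
        simp only [List.map_cons, pvLoopB, hfindB]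
        rw [hwalk]
        simp
      | none =>
        have hfindB : (e.1 :: List.map Prod.fst ft).find?
            (fun s => decide (s.1 = target ∨ s.2 = target)) = none := by
          rw [← List.map_cons, List.find?_map]
          have : ((fun s : Int × Int => decide (s.1 = target ∨ s.2 = target)) ∘ Prod.fst)
              = (fun e : (Int × Int) × List (String × (Int × Int)) =>
                  decide (e.1.1 = target ∨ e.1.2 = target)) := rfl
          rw [this, hfind, Option.map_none]
        have hml := pvExpandLevel jug1 jug2 h1 h2 (e :: ft) [] v parent
          (by simpa using hI1) (by simpa using hI2) (by simpa using hI3) hI4 hI5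
          (by
            rcases hI6 with h | ⟨hq, hv⟩
            · exact Or.inl h
            · exact Or.inr ⟨hq, rfl, hv⟩)
        dsimp only at hml
        simp only [List.map_nil] at hml
        obtain ⟨d1, d2, d3, d4, d5, d6, d7, d8, d9, d10, d11⟩ := hml
        have hfold : (e.1 :: List.map Prod.fst ft).foldl
            (fun st s => (pvSuccs jug1 jug2 s).foldl (pvStepB s) st) ([], v, parent)
            = (e :: ft).foldl
                (fun st e => (pvSuccs jug1 jug2 e.1).foldl (pvStepB e.1) st) ([], v, parent) := by
          rw [← List.map_cons, List.foldl_map]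
        simp only [List.map_cons, pvLoopB, hfindB]
        rw [hfold]
        set rA := (e :: ft).foldl
          (fun st e => (pvSuccs jug1 jug2 e.1).foldl (pvStepA' e.1 e.2) st) ([], v) with hrA
        set rB := (e :: ft).foldl
          (fun st e => (pvSuccs jug1 jug2 e.1).foldl (pvStepB e.1) st) ([], v, parent) with hrB
        have hv'G : rB.2.1.length ≤ pvG jug1 jug2 := pvVsize jug1 jug2 h1 h2 rB.2.1 d7 d6
        have h9 := d9 (by simp)
        rw [d1]
        have := ih fA' rA.1 rB.2.1 rB.2.2 d3 d4 d5 d6 d7 (Or.inl h9)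
          (by simp only [List.length_nil] at d10; simp at hfA; omega)
          (by simp only [List.length_nil] at d10; simp at hfB; omega)
        rw [this, d2]

-- ===== VERDICT (by name: the statement is the Claim_ definition above) =====
theorem solve_spec : Claim_equal_solve := by
  intro jug1 jug2 target _ hpre
  obtain ⟨h1, h2⟩ := hpre
  unfold Spec_solve solve solve_alt
  by_cases ht : target = 0
  · subst ht
    obtain ⟨m, hm⟩ : ∃ m, pvFuel jug1 jug2 0 = m + 1 :=
      ⟨pvFuel jug1 jug2 0 - 1, by have := pvFuel_big jug1 jug2 0; omega⟩
    rw [hm]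
    simp only [pvLoopA, pvLoopB]
    simp [pvWalk, hm, List.find?]
  · have hinit := pvBisim jug1 jug2 target h1 h2 ht
      (pvFuel jug1 jug2 target) (pvFuel jug1 jug2 target)
      [(((0 : Int), (0 : Int)), [])] PySem.Set.empty PySem.Dict.empty
      (by
        intro e he
        simp only [List.mem_singleton] at he
        subst he
        exact Or.inl rfl)
      (by intro e he; simp only [List.mem_singleton] at he; subst he; simp [PySem.Set.empty])
      (by
        intro e he
        simp only [List.mem_singleton] at he
        subst he
        exact ⟨le_refl _, h1, le_refl _, h2⟩)
      (by intro x hx; simp [PySem.Set.empty] at hx)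
      (by simp [PySem.Set.empty])
      (Or.inr ⟨rfl, rfl⟩)
      (by have := pvFuel_big jug1 jug2 target; simp [PySem.Set.empty]; omega)
      (by have := pvFuel_big jug1 jug2 target; simp [PySem.Set.empty]; omega)
    simpa using hinit
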